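-- pv_equiv track=rewrite | github.com/kenzkenz/open-hinata3 | src/php/vps/python_ocr_script3.py | propagate_minus_signs
-- ===== SOURCE A (Python) =====
-- def propagate_minus_signs(table):
--     """ 前の行の同じ列にマイナスがついていたら、自己にもマイナスをつける """
--     num_cols = max(len(row) for row in table if row)  # 最大列数を取得（不均一な行も処理）
--
--     for col in range(num_cols):  # 列単位で処理
--         for row in range(1, len(table)):  # 1行目から処理開始
--             if col < len(table[row - 1]) and col < len(table[row]):  # 列の範囲をチェック
--                 prev_value = str(table[row - 1][col]).strip()
--                 current_value = str(table[row][col]).strip()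
--
--                 # 可能な限り条件を緩める（マイナスで始まる、またはマイナス記号を含む）
--                 if ('-' in prev_value) and ('-' not in current_value):
--                     table[row][col] = '-' + current_value  # マイナスを適用
--
--     return table
-- ===== SOURCE B (Python) =====
-- def propagate_minus_signs(table):
--     """One top-down pass keeping the set of columns whose cell in the previous
--     row carries a minus; no num_cols / per-column scanning needed."""
--     active = set()
--     for row in table:
--         new_active = set()
--         for c, cell in enumerate(row):
--             s = str(cell).strip()
--             if c in active and '-' not in s:
--                 row[c] = '-' + s
--                 s = '-' + s
--             if '-' in s:
--                 new_active.add(c)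
--         active = new_active
--     return table
-- ===== Notes on version B (the rewrite author's own statement) =====
-- stated objective: simpler
-- what changed: Replaces A's column-by-column nested index scans (for every column up to the global max width, rescan all row pairs) by a single top-down row pass that maintains a set of 'active' columns (those whose cell in the previous row carries a minus), so each cell is visited once instead of once per column and no num_cols computation is needed.
import Mathlib
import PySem

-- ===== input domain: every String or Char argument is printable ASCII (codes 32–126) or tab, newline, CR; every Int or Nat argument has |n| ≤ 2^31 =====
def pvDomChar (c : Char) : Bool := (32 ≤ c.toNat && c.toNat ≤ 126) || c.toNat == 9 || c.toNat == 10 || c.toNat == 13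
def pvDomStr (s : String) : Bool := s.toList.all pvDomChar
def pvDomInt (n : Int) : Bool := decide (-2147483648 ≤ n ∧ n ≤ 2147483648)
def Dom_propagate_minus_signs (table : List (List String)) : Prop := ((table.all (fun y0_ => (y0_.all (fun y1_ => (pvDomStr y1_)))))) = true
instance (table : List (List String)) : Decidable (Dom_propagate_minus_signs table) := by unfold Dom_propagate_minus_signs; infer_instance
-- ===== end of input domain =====

-- B replaces A's column-outer nested index scans by one top-down row pass that maintains the
-- set of columns whose cell in the previous row carries '-' (objective: simpler). Both Pythons
-- mutate the table's rows in place in the same way; the theorems are about the return value.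

-- ===== PORT A =====
-- one step of the inner 'for row in range(1, len(table))' loop, at a fixed column
def pvAStep (col : Nat) (t : List (List String)) (row : Nat) : List (List String) :=
  let prevRow := t.getD (row - 1) []
  let curRow := t.getD row []
  if col < prevRow.length ∧ col < curRow.length then
    let prev_value := PySem.Str.strip (prevRow.getD col "")
    let current_value := PySem.Str.strip (curRow.getD col "")
    if PySem.Str.isIn "-" prev_value ∧ ¬ PySem.Str.isIn "-" current_value then
      t.set row (curRow.set col ("-" ++ current_value))
    else t
  else t

-- the inner loop: for row in range(1, len(table))
def pvAInner (col : Nat) (t : List (List String)) : List (List String) :=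
  (List.range' 1 (t.length - 1)).foldl (pvAStep col) t

def propagate_minus_signs (table : List (List String)) : List (List String) :=
  -- num_cols = max(len(row) for row in table if row); Python's max raises ValueError on an
  -- empty sequence (excluded by Pre_); on nonempty input foldl max 0 equals Python's max.
  let num_cols := ((table.filter (fun r => ¬ r.isEmpty)).map List.length).foldl max 0
  (List.range num_cols).foldl (fun t col => pvAInner col t) table

-- ===== PORT B =====
-- body of B's 'for c, cell in enumerate(row)' loop; state = (row being fixed, new_active);
-- c.toNat is exact because enumerate(row) yields indices 0,1,2,…
def pvBCell (active : PySem.Set Int) (st : List String × PySem.Set Int)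
    (p : Int × String) : List String × PySem.Set Int :=
  let s := PySem.Str.strip p.2
  let rs :=
    if p.1 ∈ active ∧ ¬ PySem.Str.isIn "-" s then
      (st.1.set p.1.toNat ("-" ++ s), "-" ++ s)
    else (st.1, s)
  if PySem.Str.isIn "-" rs.2 then (rs.1, PySem.Set.add st.2 p.1) else (rs.1, st.2)

-- fix one row against the active-column set; returns (fixed row, new_active)
def pvBRow (active : PySem.Set Int) (row : List String) : List String × PySem.Set Int :=
  (PySem.List.enumerate row 0).foldl (pvBCell active) (row, PySem.Set.empty)

-- for row in table: …; active = new_active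
def pvBGo (active : PySem.Set Int) : List (List String) → List (List String)
  | [] => []
  | row :: rest => (pvBRow active row).1 :: pvBGo (pvBRow active row).2 rest

def propagate_minus_signs_alt (table : List (List String)) : List (List String) :=
  pvBGo PySem.Set.empty table

-- ===== PRECONDITION & SPEC =====
-- Pre_ excludes exactly the tables with no nonempty row, on which Python A raises
-- ValueError (max() over an empty sequence); B returns the table unchanged there.
def Pre_propagate_minus_signs (table : List (List String)) : Prop :=
  ∃ row ∈ table, row ≠ []
instance (table : List (List String)) : Decidable (Pre_propagate_minus_signs table) := by
  unfold Pre_propagate_minus_signs; infer_instance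
def pvWitness_propagate_minus_signs : List (List String) := [["-1"], ["2"]]


def Spec_propagate_minus_signs (table : List (List String)) (out : List (List String)) : Prop :=
  out = propagate_minus_signs_alt table
instance (table : List (List String)) (out : List (List String)) :
    Decidable (Spec_propagate_minus_signs table out) := by
  unfold Spec_propagate_minus_signs; infer_instance

-- ===== CLAIM (what is proved, stated in full; the proofs are below) =====
def Claim_equal_propagate_minus_signs : Prop := ∀ (table : List (List String)), Dom_propagate_minus_signs table → Pre_propagate_minus_signs table → Spec_propagate_minus_signs table (propagate_minus_signs table)

-- ===== LEMMAS AND PROOFS =====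

-- the value a cell takes given the (fixed) cell above it (none = the row above is too short)
def pvCell (po : Option String) (s : String) : String :=
  match po with
  | some p =>
    if PySem.Str.isIn "-" (PySem.Str.strip p) ∧ ¬ PySem.Str.isIn "-" (PySem.Str.strip s) then
      "-" ++ PySem.Str.strip s
    else s
  | none => s

def pvStep (po o : Option String) : Option String := o.map (pvCell po)

-- downward propagation along one column (none entries = rows too short for this column)
def pvProp (po : Option String) : List (Option String) → List (Option String)
  | [] => []
  | o :: rest => pvStep po o :: pvProp (pvStep po o) rest

-- column c of a table, as optional entries
def pvLmap (c : Nat) (t : List (List String)) : List (Option String) :=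
  t.map (fun r => r[c]?)

-- reference row-fixing pass (mathematical midpoint between the two ports)
def pvFixStep (prev : List String) (r : List String) (c : Nat) : List String :=
  let cur := PySem.Str.strip (r.getD c "")
  if c < prev.length ∧ PySem.Str.isIn "-" (PySem.Str.strip (prev.getD c "")) ∧
      ¬ PySem.Str.isIn "-" cur then
    r.set c ("-" ++ cur)
  else r

def pvFixRow (prev row : List String) : List String :=
  (List.range row.length).foldl (pvFixStep prev) row

def pvGo (prev : List String) : List (List String) → List (List String)
  | [] => []
  | row :: rest =>
    let row' := pvFixRow prev row
    row' :: pvGo row' rest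

theorem pvStep_none (o : Option String) : pvStep none o = o := by
  cases o <;> simp [pvStep, pvCell]

theorem pvProp_length (po : Option String) (L : List (Option String)) :
    (pvProp po L).length = L.length := by
  induction L generalizing po with
  | nil => rfl
  | cons o rest ih => simp [pvProp, ih]

theorem pvProp_concat (po o : Option String) (L : List (Option String)) :
    pvProp po (L ++ [o]) = pvProp po L ++ [pvStep ((pvProp po L).getLastD po) o] := by
  induction L generalizing po with
  | nil => simp [pvProp]
  | cons x L ih =>
    rw [List.cons_append]
    simp only [pvProp, ih, List.getLastD_cons, List.cons_append]

theorem pvProp_none_of_all_none (po : Option String) (L : List (Option String))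
    (h : ∀ o ∈ L, o = none) : pvProp po L = L := by
  induction L generalizing po with
  | nil => rfl
  | cons x L ih =>
    have hx : x = none := h x (by simp)
    subst hx
    simp only [pvProp, pvStep, Option.map_none]
    exact congrArg _ (ih none (fun o ho => h o (by simp [ho])))

theorem pvProp_take_one (L : List (Option String)) :
    pvProp none (L.take 1) ++ L.drop 1 = L := by
  cases L with
  | nil => rfl
  | cons o rest => simp [pvProp, pvStep_none]

theorem pvFixRow_aux (prev row : List String) (n : Nat) (hn : n ≤ row.length) :
    ((List.range n).foldl (pvFixStep prev) row).length = row.length ∧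
    ∀ j, ((List.range n).foldl (pvFixStep prev) row)[j]? =
      if j < n then (row[j]?).map (pvCell prev[j]?) else row[j]? := by
  induction n with
  | zero => simp
  | succ n ih =>
    have hnlt : n < row.length := hn
    obtain ⟨hlen, hget⟩ := ih (by omega)
    rw [List.range_succ, List.foldl_append, List.foldl_cons, List.foldl_nil]
    set u := (List.range n).foldl (pvFixStep prev) row with hu
    have hun : u[n]? = row[n]? := by rw [hget n]; simp
    have hs : row[n]? = some row[n] := List.getElem?_eq_getElem hnlt
    have hgd : u.getD n "" = row[n] := by
      rw [List.getD_eq_getElem?_getD, hun, hs]; rfl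
    unfold pvFixStep
    simp only [hgd]
    by_cases hC : n < prev.length ∧ PySem.Str.isIn "-" (PySem.Str.strip (prev.getD n "")) ∧
        ¬ PySem.Str.isIn "-" (PySem.Str.strip row[n])
    · rw [if_pos hC]
      obtain ⟨hp, h1, h2⟩ := hC
      have hpg : prev[n]? = some prev[n] := List.getElem?_eq_getElem hp
      have hpd : prev.getD n "" = prev[n] := by
        rw [List.getD_eq_getElem?_getD, hpg]; rfl
      constructor
      · rw [List.length_set, hlen]
      · intro j
        rw [List.getElem?_set]
        by_cases hj : n = j
        · subst hj
          rw [if_pos rfl, if_pos (by omega), hs, if_pos (Nat.lt_succ_self n)]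
          simp only [Option.map_some, pvCell, hpg]
          rw [if_pos ⟨by rwa [hpd] at h1, h2⟩]
        · rw [if_neg hj, hget j]
          by_cases h : j < n
          · rw [if_pos h, if_pos (by omega)]
          · rw [if_neg h, if_neg (by omega)]
    · rw [if_neg hC]
      refine ⟨hlen, fun j => ?_⟩
      by_cases hj : j = n
      · subst hj
        rw [if_pos (by omega), hun, hs]
        simp only [Option.map_some]
        congr 1
        push Not at hC
        rcases Nat.lt_or_ge j prev.length with hp | hp
        · have hpg : prev[j]? = some prev[j] := List.getElem?_eq_getElem hp
          have hpd : prev.getD j "" = prev[j] := by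
            rw [List.getD_eq_getElem?_getD, hpg]; rfl
          simp only [pvCell, hpg]
          rw [if_neg]
          intro ⟨h1, h2⟩
          exact h2 (hC hp (by rwa [hpd]))
        · have hpg : prev[j]? = none := List.getElem?_eq_none hp
          simp [pvCell, hpg]
      · rw [hget j]
        by_cases h : j < n
        · rw [if_pos h, if_pos (by omega)]
        · rw [if_neg h, if_neg (by omega)]

theorem pvFixRow_length (prev row : List String) :
    (pvFixRow prev row).length = row.length :=
  (pvFixRow_aux prev row row.length le_rfl).1

theorem pvFixRow_get? (prev row : List String) (j : Nat) :
    (pvFixRow prev row)[j]? = pvStep prev[j]? row[j]? := by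
  have h := (pvFixRow_aux prev row row.length le_rfl).2 j
  unfold pvFixRow
  rw [h]
  by_cases hj : j < row.length
  · rw [if_pos hj]; rfl
  · rw [if_neg hj, List.getElem?_eq_none (by omega)]; rfl

theorem pvGo_length (ts : List (List String)) : ∀ prev, (pvGo prev ts).length = ts.length := by
  induction ts with
  | nil => intro prev; rfl
  | cons row rest ih => intro prev; simp [pvGo, ih]

theorem pvGo_col (c : Nat) (ts : List (List String)) : ∀ prev,
    pvLmap c (pvGo prev ts) = pvProp prev[c]? (pvLmap c ts) := by
  induction ts with
  | nil => intro prev; rfl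
  | cons row rest ih =>
    intro prev
    simp only [pvGo, pvLmap, List.map_cons, pvProp]
    rw [← pvLmap, ← pvLmap, ih (pvFixRow prev row), pvFixRow_get?]

theorem pvLmap_get? (c : Nat) (t : List (List String)) (i : Nat) (h : i < t.length) :
    (pvLmap c t)[i]? = some ((t[i]'h)[c]?) := by
  simp [pvLmap, List.getElem?_map, List.getElem?_eq_getElem h]

theorem pvAInner_aux (col : Nat) (t : List (List String)) :
    ∀ k, k ≤ t.length - 1 →
    ((List.range' 1 k).foldl (pvAStep col) t).map (fun r => r.length) =
        t.map (fun r => r.length) ∧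
    (∀ c, c ≠ col → pvLmap c ((List.range' 1 k).foldl (pvAStep col) t) = pvLmap c t) ∧
    pvLmap col ((List.range' 1 k).foldl (pvAStep col) t) =
      pvProp none ((pvLmap col t).take (k+1)) ++ (pvLmap col t).drop (k+1) := by
  intro k
  induction k with
  | zero =>
    intro _
    exact ⟨rfl, fun c _ => rfl, (pvProp_take_one _).symm⟩
  | succ k ih =>
    intro hk
    obtain ⟨ha, hb, hc⟩ := ih (by omega)
    have hn2 : k + 2 ≤ t.length := by omega
    rw [List.range'_1_concat, List.foldl_append, List.foldl_cons, List.foldl_nil]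
    set u := (List.range' 1 k).foldl (pvAStep col) t with hu
    have hulen : u.length = t.length := by simpa using congrArg List.length ha
    have hklt : k < u.length := by omega
    have hk1lt : 1 + k < u.length := by omega
    have hk1t : k + 1 < t.length := by omega
    have hkt : k < t.length := by omega
    have hgdk : u.getD k [] = u[k]'hklt := by
      rw [List.getD_eq_getElem?_getD, List.getElem?_eq_getElem hklt]; rfl
    have hgdk1 : u.getD (1+k) [] = u[1+k]'hk1lt := by
      rw [List.getD_eq_getElem?_getD, List.getElem?_eq_getElem hk1lt]; rfl
    have hLclen : (pvLmap col t).length = t.length := by simp [pvLmap]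
    set Lc := pvLmap col t with hLc
    set P := pvProp none (Lc.take (k+1)) with hP
    have hPlen : P.length = k + 1 := by
      rw [hP, pvProp_length, List.length_take]; omega
    have hPk : P[k]? = some ((u[k]'hklt)[col]?) := by
      have h1 := pvLmap_get? col u k hklt
      rw [hc, List.getElem?_append_left (by omega : k < P.length)] at h1
      exact h1
    have hlast : P.getLastD none = (u[k]'hklt)[col]? := by
      rw [List.getLastD_eq_getLast?, List.getLast?_eq_getElem?, hPlen,
        Nat.add_sub_cancel, hPk]
      rfl
    have he : Lc[k+1]? = some ((t[k+1]'hk1t)[col]?) := pvLmap_get? col t (k+1) hk1t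
    have hecur : (u[1+k]'hk1lt)[col]? = (t[k+1]'hk1t)[col]? := by
      have h1 := pvLmap_get? col u (1+k) hk1lt
      rw [hc, List.getElem?_append_right (by omega : P.length ≤ 1+k), hPlen,
        List.getElem?_drop, show k + 1 + (1 + k - (k + 1)) = k + 1 from by omega, he] at h1
      exact (Option.some.inj h1).symm
    have heel : Lc[k+1]'(by omega) = (t[k+1]'hk1t)[col]? := by
      have := he
      rw [List.getElem?_eq_getElem (show k+1 < Lc.length by omega)] at this
      exact Option.some.inj this
    have hdrop : Lc.drop (k+1) = ((t[k+1]'hk1t)[col]?) :: Lc.drop (k+2) := by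
      rw [List.drop_eq_getElem_cons (show k+1 < Lc.length by omega), heel]
    have htake : Lc.take (k+2) = Lc.take (k+1) ++ [(t[k+1]'hk1t)[col]?] := by
      rw [show k + 2 = (k+1) + 1 from rfl, List.take_add_one, he]
      rfl
    have hconcat : pvProp none (Lc.take (k+2)) =
        P ++ [pvStep ((u[k]'hklt)[col]?) ((t[k+1]'hk1t)[col]?)] := by
      rw [htake, pvProp_concat, hlast]
    have main : ∀ v : List (List String),
        v.map (fun r => r.length) = u.map (fun r => r.length) →
        (∀ c, c ≠ col → pvLmap c v = pvLmap c u) →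
        pvLmap col v = P ++
          (pvStep ((u[k]'hklt)[col]?) ((t[k+1]'hk1t)[col]?)) :: Lc.drop (k+2) →
        v.map (fun r => r.length) = t.map (fun r => r.length) ∧
        (∀ c, c ≠ col → pvLmap c v = pvLmap c t) ∧
        pvLmap col v = pvProp none (Lc.take (k+1+1)) ++ Lc.drop (k+1+1) := by
      intro v h1 h2 h3
      refine ⟨h1.trans ha, fun c hcne => (h2 c hcne).trans (hb c hcne), ?_⟩
      rw [show k+1+1 = k+2 from rfl, hconcat, h3, List.append_assoc, List.singleton_append]
    unfold pvAStep
    simp only [show 1 + k - 1 = k from by omega, hgdk, hgdk1]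
    by_cases hout : col < (u[k]'hklt).length ∧ col < (u[1+k]'hk1lt).length
    · rw [if_pos hout]
      obtain ⟨hop, hoc⟩ := hout
      have hpg : (u[k]'hklt)[col]? = some ((u[k]'hklt)[col]'hop) := List.getElem?_eq_getElem hop
      have hcg : (u[1+k]'hk1lt)[col]? = some ((u[1+k]'hk1lt)[col]'hoc) := List.getElem?_eq_getElem hoc
      have hpd : (u[k]'hklt).getD col "" = (u[k]'hklt)[col]'hop := by
        rw [List.getD_eq_getElem?_getD, hpg]; rfl
      have hcd : (u[1+k]'hk1lt).getD col "" = (u[1+k]'hk1lt)[col]'hoc := by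
        rw [List.getD_eq_getElem?_getD, hcg]; rfl
      have hstepval : pvStep ((u[k]'hklt)[col]?) ((t[k+1]'hk1t)[col]?) =
          some (pvCell (some ((u[k]'hklt)[col]'hop)) ((u[1+k]'hk1lt)[col]'hoc)) := by
        rw [← hecur, hcg, hpg]; rfl
      by_cases hin : PySem.Str.isIn "-" (PySem.Str.strip ((u[k]'hklt).getD col "")) ∧
          ¬ PySem.Str.isIn "-" (PySem.Str.strip ((u[1+k]'hk1lt).getD col ""))
      · rw [if_pos hin]
        obtain ⟨h1, h2⟩ := hin
        refine main _ ?_ ?_ ?_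
        · rw [List.map_set, List.length_set]
          have hself := List.set_getElem_self
            (as := u.map (fun r => r.length)) (i := 1+k) (by simpa using hk1lt)
          rwa [List.getElem_map] at hself
        · intro c hcne
          unfold pvLmap
          rw [List.map_set, List.getElem?_set_ne (fun h => hcne h.symm)]
          have hself := List.set_getElem_self
            (as := u.map (fun r => r[c]?)) (i := 1+k) (by simpa using hk1lt)
          rwa [List.getElem_map] at hself
        · unfold pvLmap
          rw [List.map_set, List.getElem?_set_self hoc]
          rw [← pvLmap, hc, hdrop, hP, List.set_append]
          rw [if_neg (by rw [pvProp_length, List.length_take]; omega)]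
          rw [show 1 + k - (pvProp none (Lc.take (k+1))).length = 0 from by
            rw [pvProp_length, List.length_take]; omega]
          rw [List.set_cons_zero, hstepval]
          rw [show pvCell (some ((u[k]'hklt)[col]'hop)) ((u[1+k]'hk1lt)[col]'hoc) =
              "-" ++ PySem.Str.strip ((u[1+k]'hk1lt)[col]'hoc) from by
            simp only [pvCell]
            rw [if_pos ⟨by rwa [hpd] at h1, by rwa [hcd] at h2⟩]]
          rw [hcd]
      · rw [if_neg hin]
        refine main _ rfl (fun _ _ => rfl) ?_
        rw [hc, hdrop, hstepval]
        have : pvCell (some ((u[k]'hklt)[col]'hop)) ((u[1+k]'hk1lt)[col]'hoc) =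
            (u[1+k]'hk1lt)[col]'hoc := by
          simp only [pvCell]
          rw [if_neg]
          intro ⟨h1, h2⟩
          exact hin ⟨by rwa [hpd], by rwa [hcd]⟩
        rw [this, ← hecur, hcg]
    · rw [if_neg hout]
      refine main _ rfl (fun _ _ => rfl) ?_
      rw [hc, hdrop]
      have : pvStep ((u[k]'hklt)[col]?) ((t[k+1]'hk1t)[col]?) = (t[k+1]'hk1t)[col]? := by
        rcases Nat.lt_or_ge col (u[k]'hklt).length with hop | hop
        · have hoc : ¬ col < (u[1+k]'hk1lt).length := fun h => hout ⟨hop, h⟩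
          have : (u[1+k]'hk1lt)[col]? = none := List.getElem?_eq_none (by omega)
          rw [← hecur, this]
          rfl
        · have : (u[k]'hklt)[col]? = none := List.getElem?_eq_none (by omega)
          rw [this, pvStep_none]
      rw [this]

theorem pvAInner_spec (col : Nat) (t : List (List String)) :
    (pvAInner col t).map (fun r => r.length) = t.map (fun r => r.length) ∧
    (∀ c, c ≠ col → pvLmap c (pvAInner col t) = pvLmap c t) ∧
    pvLmap col (pvAInner col t) = pvProp none (pvLmap col t) := by
  unfold pvAInner
  obtain ⟨ha, hb, hc⟩ := pvAInner_aux col t (t.length - 1) le_rfl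
  refine ⟨ha, hb, ?_⟩
  rw [hc]
  rcases Nat.eq_zero_or_pos t.length with h0 | hpos
  · have : t = [] := List.length_eq_zero_iff.mp h0
    subst this
    rfl
  · have hlen : (pvLmap col t).length = t.length := by simp [pvLmap]
    rw [show t.length - 1 + 1 = t.length from by omega,
      List.take_of_length_le (by omega), List.drop_of_length_le (by omega),
      List.append_nil]

theorem pvA_outer (t : List (List String)) (m : Nat) :
    ((List.range m).foldl (fun t col => pvAInner col t) t).map (fun r => r.length) =
        t.map (fun r => r.length) ∧
    ∀ c, pvLmap c ((List.range m).foldl (fun t col => pvAInner col t) t) =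
      if c < m then pvProp none (pvLmap c t) else pvLmap c t := by
  induction m with
  | zero => simp
  | succ m ih =>
    obtain ⟨ha, hb⟩ := ih
    rw [List.range_succ, List.foldl_append, List.foldl_cons, List.foldl_nil]
    obtain ⟨ha', hb', hc'⟩ :=
      pvAInner_spec m ((List.range m).foldl (fun t col => pvAInner col t) t)
    refine ⟨ha'.trans ha, fun c => ?_⟩
    by_cases hcm : c = m
    · subst hcm
      rw [hc', hb c, if_neg (by omega), if_pos (by omega)]
    · rcases Nat.lt_or_ge c m with h | h
      · rw [hb' c hcm, hb c, if_pos h, if_pos (by omega)]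
      · rw [hb' c hcm, hb c, if_neg (by omega), if_neg (by omega)]

theorem pvExt (u v : List (List String)) (hlen : u.length = v.length)
    (h : ∀ c, pvLmap c u = pvLmap c v) : u = v := by
  apply List.ext_getElem?
  intro i
  rcases Nat.lt_or_ge i u.length with hi1 | hi1
  · have hi2 : i < v.length := by omega
    have hrc : ∀ c : Nat, (u[i]'hi1)[c]? = (v[i]'hi2)[c]? := by
      intro c
      have := congrArg (fun l => l[i]?) (h c)
      simpa [pvLmap, List.getElem?_map, List.getElem?_eq_getElem hi1,
        List.getElem?_eq_getElem hi2] using this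
    rw [List.getElem?_eq_getElem hi1, List.getElem?_eq_getElem hi2]
    exact congrArg some (List.ext_getElem? hrc)
  · rw [List.getElem?_eq_none (by omega), List.getElem?_eq_none (by omega)]

-- A equals the reference pass pvGo
theorem pvA_eq_pvGo (t : List (List String)) : propagate_minus_signs t = pvGo [] t := by
  have hA : propagate_minus_signs t =
      (List.range (((t.filter (fun r => ¬ r.isEmpty)).map List.length).foldl max 0)).foldl
        (fun t col => pvAInner col t) t := rfl
  have hbound : ∀ r ∈ t, r.length ≤
      ((t.filter (fun r => ¬ r.isEmpty)).map List.length).foldl max 0 := by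
    intro r hr
    by_cases hre : r.isEmpty
    · rw [List.isEmpty_iff] at hre
      subst hre
      exact Nat.zero_le _
    · exact (PySem.List.le_foldl_max _ 0).2 r.length
        (List.mem_map_of_mem (List.mem_filter.mpr ⟨hr, by simpa using hre⟩))
  obtain ⟨ha, hb⟩ := pvA_outer t (((t.filter (fun r => ¬ r.isEmpty)).map List.length).foldl max 0)
  rw [hA]
  apply pvExt
  · have h1 : ((List.range (((t.filter (fun r => ¬ r.isEmpty)).map List.length).foldl max 0)).foldl
        (fun t col => pvAInner col t) t).length = t.length := by
      simpa using congrArg List.length ha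
    rw [h1]
    exact (pvGo_length t []).symm
  · intro c
    have hB : pvLmap c (pvGo [] t) = pvProp none (pvLmap c t) := by
      rw [pvGo_col c t []]
      rfl
    rw [hB, hb c]
    by_cases hcm : c < ((t.filter (fun r => ¬ r.isEmpty)).map List.length).foldl max 0
    · rw [if_pos hcm]
    · rw [if_neg hcm]
      refine (pvProp_none_of_all_none none (pvLmap c t) ?_).symm
      intro o ho
      simp only [pvLmap, List.mem_map] at ho
      obtain ⟨r, hr, rfl⟩ := ho
      exact List.getElem?_eq_none (by have := hbound r hr; omega)

-- ===== B-side proofs: pvBGo equals pvGo =====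

-- '-' in s once s starts with '-'
theorem pvCharsIsIn_dash_cons (l : List Char) : PySem.Chars.isIn ['-'] ('-' :: l) = true := by
  rw [PySem.Chars.isIn_iff_infix]
  exact ⟨[], l, rfl⟩


-- '-' survives strip of a string that starts with '-'
theorem pvIsIn_dash_strip_dash (t : String) :
    PySem.Str.isIn "-" (PySem.Str.strip ("-" ++ t)) = true := by
  rw [PySem.Str.isIn_iff_infix]
  have h1 : (PySem.Str.strip ("-" ++ t)).toList = PySem.Chars.strip ('-' :: t.toList) := by
    simp
  rw [h1]
  have h2 : PySem.Chars.strip ('-' :: t.toList) =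
      PySem.Chars.rstrip ('-' :: t.toList) := by
    show PySem.Chars.rstrip (PySem.Chars.lstrip ('-' :: t.toList)) = _
    rw [show PySem.Chars.lstrip ('-' :: t.toList) = '-' :: t.toList from by
      simp only [PySem.Chars.lstrip, List.dropWhile,
        show PySem.Chars.isspace '-' = false from by decide]]
  rw [h2]
  have h3 : '-' ∈ PySem.Chars.rstrip ('-' :: t.toList) := by
    simp only [PySem.Chars.rstrip, List.reverse_cons, List.dropWhile_append,
      List.mem_reverse]
    split_ifs with hh
    · simp [List.dropWhile, show PySem.Chars.isspace '-' = false from by decide]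
    · simp
  obtain ⟨s, u, hsu⟩ := List.mem_iff_append.mp h3
  rw [hsu]
  exact ⟨s, u, by simp⟩

-- the per-cell function of B, at Nat index j
def pvCellB (active : PySem.Set Int) (j : Nat) (s : String) : String :=
  if (j : Int) ∈ active ∧ ¬ PySem.Str.isIn "-" (PySem.Str.strip s) then
    "-" ++ PySem.Str.strip s
  else s

-- the invariant tying B's active set to the previous (already fixed) row of pvGo
def pvInv (active : PySem.Set Int) (prev : List String) : Prop :=
  ∀ n : Nat, ((n : Int) ∈ active) ↔
    (n < prev.length ∧ PySem.Str.isIn "-" (PySem.Str.strip (prev.getD n "")) = true)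

theorem pvBRow_aux (active : PySem.Set Int) (row : List String) (n : Nat) (hn : n ≤ row.length) :
    (((PySem.List.enumerate row 0).take n).foldl (pvBCell active) (row, PySem.Set.empty)).1.length
        = row.length ∧
    (∀ j : Nat, (((PySem.List.enumerate row 0).take n).foldl (pvBCell active)
        (row, PySem.Set.empty)).1[j]? =
      if j < n then (row[j]?).map (pvCellB active j) else row[j]?) ∧
    (∀ x : Int, x ∈ (((PySem.List.enumerate row 0).take n).foldl (pvBCell active)
        (row, PySem.Set.empty)).2 ↔
      ∃ j : Nat, j < n ∧ x = (j : Int) ∧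
        ((j : Int) ∈ active ∨ PySem.Str.isIn "-" (PySem.Str.strip (row.getD j "")) = true)) := by
  induction n with
  | zero =>
    refine ⟨rfl, fun j => by simp, fun x => ?_⟩
    simp [PySem.Set.empty]
  | succ n ih =>
    have hnlt : n < row.length := hn
    obtain ⟨hlen, hget, hmem⟩ := ih (by omega)
    have htk : (PySem.List.enumerate row 0).take (n+1) =
        (PySem.List.enumerate row 0).take n ++ [((n : Int), row[n])] := by
      rw [List.take_add_one]
      have : (PySem.List.enumerate row 0)[n]? = some ((n : Int), row[n]) := by
        rw [PySem.List.getElem?_enumerate, List.getElem?_eq_getElem hnlt]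
        simp
      rw [this]
      rfl
    rw [htk, List.foldl_append, List.foldl_cons, List.foldl_nil]
    set st := ((PySem.List.enumerate row 0).take n).foldl (pvBCell active)
      (row, PySem.Set.empty) with hst
    have hs : row[n]? = some row[n] := List.getElem?_eq_getElem hnlt
    have hgd : row.getD n "" = row[n] := by
      rw [List.getD_eq_getElem?_getD, hs]; rfl
    have hstep : pvBCell active st ((n : Int), row[n]) =
        (if (n : Int) ∈ active ∧ ¬ PySem.Str.isIn "-" (PySem.Str.strip row[n]) then
           st.1.set n ("-" ++ PySem.Str.strip row[n]) else st.1,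
         if (n : Int) ∈ active ∨ PySem.Str.isIn "-" (PySem.Str.strip row[n]) = true then
           PySem.Set.add st.2 (n : Int) else st.2) := by
      by_cases hM : (n : Int) ∈ active <;>
        by_cases hI : PySem.Chars.isIn ['-'] (PySem.Chars.strip row[n].toList) = true <;>
        simp [pvBCell, hM, hI, pvCharsIsIn_dash_cons]
    rw [hstep]
    refine ⟨?_, ?_, ?_⟩
    · by_cases hC : (n : Int) ∈ active ∧ ¬ PySem.Str.isIn "-" (PySem.Str.strip row[n])
      · simp only [if_pos hC, List.length_set, hlen]
      · simp only [if_neg hC, hlen]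
    · intro j
      by_cases hC : (n : Int) ∈ active ∧ ¬ PySem.Str.isIn "-" (PySem.Str.strip row[n])
      · simp only [if_pos hC]
        rw [List.getElem?_set]
        by_cases hj : n = j
        · subst hj
          rw [if_pos rfl, if_pos (by rw [hlen]; exact hnlt), hs,
            if_pos (Nat.lt_succ_self n)]
          simp only [Option.map_some, pvCellB]
          rw [if_pos hC]
        · rw [if_neg hj, hget j]
          by_cases h : j < n
          · rw [if_pos h, if_pos (by omega)]
          · rw [if_neg h, if_neg (by omega)]
      · simp only [if_neg hC]
        by_cases hj : j = n
        · subst hj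
          rw [hget j, if_neg (by omega), if_pos (by omega), hs]
          simp only [Option.map_some, pvCellB]
          rw [if_neg hC]
        · rw [hget j]
          by_cases h : j < n
          · rw [if_pos h, if_pos (by omega)]
          · rw [if_neg h, if_neg (by omega)]
    · intro x
      by_cases hD : (n : Int) ∈ active ∨ PySem.Str.isIn "-" (PySem.Str.strip row[n]) = true
      · simp only [if_pos hD, PySem.Set.mem_add, hmem x]
        constructor
        · rintro (⟨j, hj, rfl, hcj⟩ | rfl)
          · exact ⟨j, by omega, rfl, hcj⟩
          · exact ⟨n, Nat.lt_succ_self n, rfl, by rwa [hgd]⟩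
        · rintro ⟨j, hj, rfl, hcj⟩
          by_cases h : j < n
          · exact Or.inl ⟨j, h, rfl, hcj⟩
          · have : j = n := by omega
            subst this
            exact Or.inr rfl
      · simp only [if_neg hD, hmem x]
        constructor
        · rintro ⟨j, hj, rfl, hcj⟩
          exact ⟨j, by omega, rfl, hcj⟩
        · rintro ⟨j, hj, rfl, hcj⟩
          by_cases h : j < n
          · exact ⟨j, h, rfl, hcj⟩
          · have : j = n := by omega
            subst this
            exact absurd (by rwa [hgd] at hcj) hD

theorem pvBRow_spec (active : PySem.Set Int) (prev row : List String)
    (hInv : pvInv active prev) :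
    (pvBRow active row).1 = pvFixRow prev row ∧
    pvInv (pvBRow active row).2 (pvFixRow prev row) := by
  have hfull : (PySem.List.enumerate row 0).take row.length = PySem.List.enumerate row 0 := by
    rw [List.take_of_length_le (by rw [PySem.List.length_enumerate])]
  obtain ⟨hlen, hget, hmem⟩ := pvBRow_aux active row row.length le_rfl
  rw [hfull] at hlen hget hmem
  have hBrow : pvBRow active row =
      (PySem.List.enumerate row 0).foldl (pvBCell active) (row, PySem.Set.empty) := rfl
  have hcellEq : ∀ (j : Nat) (hj : j < row.length),
      pvCellB active j (row[j]'hj) = pvCell prev[j]? (row[j]'hj) := by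
    intro j hj
    rcases Nat.lt_or_ge j prev.length with hp | hp
    · have hpg : prev[j]? = some (prev[j]'hp) := List.getElem?_eq_getElem hp
      have hpd : prev.getD j "" = prev[j]'hp := by
        rw [List.getD_eq_getElem?_getD, hpg]; rfl
      simp only [pvCellB, pvCell, hpg]
      by_cases hc : PySem.Str.isIn "-" (PySem.Str.strip (row[j]'hj)) = true
      · rw [if_neg (by intro h; exact h.2 hc), if_neg (by intro h; exact h.2 hc)]
      · by_cases hM : (j : Int) ∈ active
        · have h1 : PySem.Str.isIn "-" (PySem.Str.strip (prev[j]'hp)) = true := by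
            have := ((hInv j).mp hM).2
            rwa [hpd] at this
          rw [if_pos ⟨hM, by simpa using hc⟩, if_pos ⟨h1, by simpa using hc⟩]
        · have h1 : ¬ PySem.Str.isIn "-" (PySem.Str.strip (prev[j]'hp)) = true := by
            intro h
            exact hM ((hInv j).mpr ⟨hp, by rwa [hpd]⟩)
          rw [if_neg (by intro h; exact hM h.1), if_neg (by intro h; exact h1 h.1)]
    · have hpg : prev[j]? = none := List.getElem?_eq_none hp
      have hM : ¬ (j : Int) ∈ active := by
        intro h
        have := (hInv j).mp h
        omega
      simp only [pvCellB, pvCell, hpg]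
      rw [if_neg (by intro h; exact hM h.1)]
  have h1 : (pvBRow active row).1 = pvFixRow prev row := by
    rw [hBrow]
    apply List.ext_getElem?
    intro j
    rw [hget j, pvFixRow_get?]
    by_cases hj : j < row.length
    · have hs : row[j]? = some (row[j]'hj) := List.getElem?_eq_getElem hj
      rw [if_pos hj, hs]
      simp only [pvStep, Option.map_some]
      exact congrArg some (hcellEq j hj)
    · rw [if_neg hj, List.getElem?_eq_none (by omega)]
      rfl
  refine ⟨h1, ?_⟩
  intro m
  rw [hBrow] at h1 ⊢
  rw [hmem ((m : Int))]
  have hlen' : (pvFixRow prev row).length = row.length := pvFixRow_length prev row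
  constructor
  · rintro ⟨j, hj, hxj, hcj⟩
    have hmj : m = j := by exact_mod_cast hxj
    subst hmj
    refine ⟨by omega, ?_⟩
    have hs : row[m]? = some (row[m]'hj) := List.getElem?_eq_getElem hj
    have hgd : row.getD m "" = row[m]'hj := by
      rw [List.getD_eq_getElem?_getD, hs]; rfl
    have hval : (pvFixRow prev row).getD m "" = pvCellB active m (row[m]'hj) := by
      rw [List.getD_eq_getElem?_getD, pvFixRow_get?, hs]
      simp only [pvStep, Option.map_some, Option.getD_some]
      exact (hcellEq m hj).symm
    rw [hval]
    by_cases hC : (m : Int) ∈ active ∧ ¬ PySem.Str.isIn "-" (PySem.Str.strip (row[m]'hj))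
    · simp only [pvCellB, if_pos hC]
      exact pvIsIn_dash_strip_dash _
    · simp only [pvCellB, if_neg hC]
      rcases hcj with hM | hI
      · by_cases hc : PySem.Str.isIn "-" (PySem.Str.strip (row[m]'hj)) = true
        · exact hc
        · exact absurd ⟨hM, by simpa using hc⟩ hC
      · rwa [hgd] at hI
  · rintro ⟨hm, hI⟩
    have hj : m < row.length := by omega
    refine ⟨m, hj, rfl, ?_⟩
    have hs : row[m]? = some (row[m]'hj) := List.getElem?_eq_getElem hj
    have hgd : row.getD m "" = row[m]'hj := by
      rw [List.getD_eq_getElem?_getD, hs]; rfl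
    have hval : (pvFixRow prev row).getD m "" = pvCellB active m (row[m]'hj) := by
      rw [List.getD_eq_getElem?_getD, pvFixRow_get?, hs]
      simp only [pvStep, Option.map_some, Option.getD_some]
      exact (hcellEq m hj).symm
    rw [hval] at hI
    rw [hgd]
    by_cases hC : (m : Int) ∈ active ∧ ¬ PySem.Str.isIn "-" (PySem.Str.strip (row[m]'hj))
    · exact Or.inl hC.1
    · simp only [pvCellB, if_neg hC] at hI
      exact Or.inr hI

theorem pvBGo_eq_pvGo (ts : List (List String)) : ∀ (active : PySem.Set Int)
    (prev : List String), pvInv active prev → pvBGo active ts = pvGo prev ts := by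
  induction ts with
  | nil => intro _ _ _; rfl
  | cons row rest ih =>
    intro active prev hInv
    obtain ⟨h1, h2⟩ := pvBRow_spec active prev row hInv
    simp only [pvBGo, pvGo, h1]
    exact congrArg _ (ih _ _ h2)

theorem pvInv_empty : pvInv PySem.Set.empty [] := by
  intro n
  simp [PySem.Set.empty]

theorem pvAB (t : List (List String)) :
    propagate_minus_signs t = propagate_minus_signs_alt t := by
  rw [pvA_eq_pvGo]
  exact (pvBGo_eq_pvGo t PySem.Set.empty [] pvInv_empty).symm

-- ===== VERDICT (by name: the statements are the Claim_ definitions above) =====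
theorem propagate_minus_signs_spec : Claim_equal_propagate_minus_signs := by
  intro table _ _
  unfold Spec_propagate_minus_signs
  exact pvAB table
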